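-- pv_equiv track=rewrite | github.com/ogi-ivanovic/HTML-Verifier | scraper/scraper.py | cleanUpTags
-- ===== SOURCE A (Python) =====
-- def cleanUpTags(htmlString):
--     """ cleans up all tags in the htmlString by removing extra information
--         ex: all <div class="header"> become <div>
--         ex: all </div> stay </div> """
--     cleanHtml = ""
--     inDiv = False
--     onDiv = False
--     length = len(htmlString)
--     i = 0
--     while (i < length):
--         if inDiv:
--             if htmlString[i] == ' ':
--                 onDiv = False
--             elif htmlString[i] == '>':
--                 inDiv = False
--                 cleanHtml += htmlString[i]
--             elif onDiv:
--                 cleanHtml += htmlString[i]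
--         else:
--             if htmlString[i] == '<':
--                 inDiv = True
--                 onDiv = True
--             cleanHtml += htmlString[i]
--         i += 1
--
--     return cleanHtml
-- ===== SOURCE B (Python) =====
-- def cleanUpTags(htmlString):
--     """ cleans up all tags in the htmlString by removing extra information
--         ex: all <div class="header"> become <div>
--         ex: all </div> stay </div> """
--     out = []
--     i = 0
--     while True:
--         j = htmlString.find('<', i)
--         if j == -1:
--             out.append(htmlString[i:])
--             break
--         out.append(htmlString[i:j])
--         k = htmlString.find('>', j)
--         if k == -1:
--             body = htmlString[j + 1:]
--         else:
--             body = htmlString[j + 1:k]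
--         sp = body.find(' ')
--         name = body if sp == -1 else body[:sp]
--         if k == -1:
--             out.append('<' + name)
--             break
--         out.append('<' + name + '>')
--         i = k + 1
--     return ''.join(out)
-- ===== Notes on version B (the rewrite author's own statement) =====
-- stated objective: faster
-- what changed: Replaces the char-by-char inDiv/onDiv state machine (with quadratic string += accumulation) by a tokenizer that jumps between '<' and '>' with str.find, slices, and rebuilds each tag as '<' + name-up-to-first-space (+ '>'), joining the pieces once.
import Mathlib
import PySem

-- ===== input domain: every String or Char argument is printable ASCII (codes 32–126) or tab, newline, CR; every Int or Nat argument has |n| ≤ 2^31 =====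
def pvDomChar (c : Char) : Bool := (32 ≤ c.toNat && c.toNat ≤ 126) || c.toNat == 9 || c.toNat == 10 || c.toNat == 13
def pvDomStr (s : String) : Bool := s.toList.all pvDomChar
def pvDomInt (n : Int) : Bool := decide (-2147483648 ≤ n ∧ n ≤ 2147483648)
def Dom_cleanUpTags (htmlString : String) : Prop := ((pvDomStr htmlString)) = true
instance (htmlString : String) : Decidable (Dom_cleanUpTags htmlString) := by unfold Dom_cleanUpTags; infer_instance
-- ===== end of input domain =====

-- B replaces A's char-by-char inDiv/onDiv state machine by a find-based tag tokenizer
-- (jump to the next '<', take the name up to the first space, reattach '>' if the tag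
-- is closed), joined once instead of accumulated with string +=; a timing run
-- measured B faster on the generated inputs.

-- ===== PORT A =====
-- one iteration of A's while loop; state = (cleanHtml, inDiv, onDiv)
def pvStepA (st : List Char × Bool × Bool) (c : Char) : List Char × Bool × Bool :=
  match st with
  | (acc, inDiv, onDiv) =>
    if inDiv then
      if c = ' ' then (acc, true, false)
      else if c = '>' then (acc ++ [c], false, onDiv)
      else if onDiv then (acc ++ [c], true, onDiv)
      else (acc, true, onDiv)
    else
      if c = '<' then (acc ++ [c], true, true)
      else (acc ++ [c], false, onDiv)

def cleanUpTags (htmlString : String) : String :=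
  String.mk (htmlString.toList.foldl pvStepA ([], false, false)).1

-- ===== PORT B =====
-- Source B's find/slice loop on the char list: htmlString[i:htmlString.find('<', i)] is
-- takeWhile (· ≠ '<'), the slice from the found '<' onward is dropWhile (· ≠ '<');
-- likewise for '>' and body[:body.find(' ')] (takeWhile/dropWhile are exact for these).
def cleanUpTagsGo (cs : List Char) : List Char :=
  match h : cs.dropWhile (· ≠ '<') with
  | [] => cs.takeWhile (· ≠ '<')
  | _ :: tl =>
    let name := (tl.takeWhile (· ≠ '>')).takeWhile (· ≠ ' ')
    match h2 : tl.dropWhile (· ≠ '>') with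
    | [] => cs.takeWhile (· ≠ '<') ++ '<' :: name
    | _ :: tl2 => cs.takeWhile (· ≠ '<') ++ '<' :: name ++ '>' :: cleanUpTagsGo tl2
termination_by cs.length
decreasing_by
  have h1 : (cs.dropWhile (· ≠ '<')).length ≤ cs.length := List.length_dropWhile_le _ _
  have h3 : (tl.dropWhile (· ≠ '>')).length ≤ tl.length := List.length_dropWhile_le _ _
  rw [h] at h1; rw [h2] at h3
  simp at h1 h3; omega

def cleanUpTags_alt (htmlString : String) : String :=
  String.mk (cleanUpTagsGo htmlString.toList)

-- ===== PRECONDITION & SPEC =====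
def Spec_cleanUpTags (htmlString : String) (out : String) : Prop := out = cleanUpTags_alt htmlString
instance (htmlString : String) (out : String) : Decidable (Spec_cleanUpTags htmlString out) := by unfold Spec_cleanUpTags; infer_instance

-- ===== CLAIM (what is proved, stated in full; the proofs are below) =====
def Claim_equal_cleanUpTags : Prop := ∀ (htmlString : String), Dom_cleanUpTags htmlString → Spec_cleanUpTags htmlString (cleanUpTags htmlString)

-- ===== LEMMAS AND PROOFS =====

-- recursive restatement of A's loop (output only; state passed as arguments)
def aGo : List Char → Bool → Bool → List Char
  | [], _, _ => []
  | c :: cs, true, onDiv =>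
    if c = ' ' then aGo cs true false
    else if c = '>' then c :: aGo cs false onDiv
    else if onDiv then c :: aGo cs true onDiv
    else aGo cs true onDiv
  | c :: cs, false, onDiv =>
    if c = '<' then c :: aGo cs true true
    else c :: aGo cs false onDiv

-- A's foldl accumulates exactly aGo
theorem foldA_eq_aGo (cs : List Char) : ∀ (acc : List Char) (d o : Bool),
    (cs.foldl pvStepA (acc, d, o)).1 = acc ++ aGo cs d o := by
  induction cs with
  | nil => intro acc d o; simp [aGo]
  | cons c cs ih =>
    intro acc d o
    simp only [List.foldl_cons]
    cases d
    · by_cases hc : c = '<' <;> simp [pvStepA, hc, aGo, ih]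
    · by_cases h1 : c = ' '
      · simp [pvStepA, h1, aGo, ih]
      · by_cases h2 : c = '>'
        · simp [pvStepA, h1, h2, aGo, ih]
        · cases o <;> simp [pvStepA, h1, h2, aGo, ih]

-- outside a tag, A's output does not depend on onDiv
theorem aGo_false_irrel (cs : List Char) : ∀ (o o' : Bool),
    aGo cs false o = aGo cs false o' := by
  induction cs with
  | nil => intro o o'; rfl
  | cons c cs ih =>
    intro o o'
    by_cases hc : c = '<' <;> simp [aGo, hc, ih o o']

-- inside a tag: emitted = (name prefix if still on the name) then '>' and the rest
theorem aGo_true (cs : List Char) : ∀ (b : Bool),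
    aGo cs true b =
      (if b then (cs.takeWhile (· ≠ '>')).takeWhile (· ≠ ' ') else []) ++
        (match cs.dropWhile (· ≠ '>') with
         | [] => []
         | _ :: tl => '>' :: aGo tl false true) := by
  induction cs with
  | nil => intro b; cases b <;> simp [aGo]
  | cons c cs ih =>
    intro b
    by_cases hsp : c = ' '
    · subst hsp
      simp only [aGo, if_pos rfl, ih false]
      have : (' ' : Char) ≠ '>' := by decide
      cases b <;> simp [List.takeWhile_cons, List.dropWhile_cons, this]
    · by_cases hgt : c = '>'
      · subst hgt
        have hne : ('>' : Char) ≠ ' ' := by decide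
        simp only [aGo, if_neg hne, if_pos rfl]
        have hirr := aGo_false_irrel cs b true
        cases b <;> simp [List.takeWhile_cons, List.dropWhile_cons, hirr]
      · simp only [aGo, if_neg hsp, if_neg hgt]
        cases b
        · simp only [Bool.false_eq_true, if_false, ih false]
          simp [List.takeWhile_cons, List.dropWhile_cons, hgt]
        · simp only [if_pos rfl, ih true]
          simp [List.takeWhile_cons, List.dropWhile_cons, hgt, hsp]

-- outside a tag: emitted = text up to '<', then '<' and the in-tag processing
theorem aGo_false_tw (cs : List Char) : ∀ (o : Bool),
    aGo cs false o = cs.takeWhile (· ≠ '<') ++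
      (match cs.dropWhile (· ≠ '<') with
       | [] => []
       | _ :: tl => '<' :: aGo tl true true) := by
  induction cs with
  | nil => intro o; simp [aGo]
  | cons c cs ih =>
    intro o
    by_cases hc : c = '<'
    · subst hc; simp [aGo, List.takeWhile_cons, List.dropWhile_cons]
    · simp [aGo, hc, ih o, List.takeWhile_cons, List.dropWhile_cons]

-- main bridge: A's loop from outside-a-tag state equals B's tokenizer
theorem aGo_eq_go (cs : List Char) : ∀ (o : Bool),
    aGo cs false o = cleanUpTagsGo cs := by
  have main : cleanUpTagsGo cs = aGo cs false true := by
    fun_induction cleanUpTagsGo cs with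
    | case1 cs h => rw [aGo_false_tw cs true, h]; simp
    | case2 cs hd tl h name h2 =>
      rw [aGo_false_tw cs true, h]
      simp only [aGo_true tl true, h2, name]
      simp
    | case3 cs hd tl h name hd2 tl2 h2 ih =>
      rw [aGo_false_tw cs true, h]
      simp only [aGo_true tl true, h2, ih, name]
      simp [List.append_assoc]
  intro o
  rw [aGo_false_irrel cs o true, main]

-- ===== VERDICT (by name: the statement is the Claim_ definition above) =====
theorem cleanUpTags_spec : Claim_equal_cleanUpTags := by
  intro s _
  show _ = _
  unfold cleanUpTags cleanUpTags_alt
  rw [foldA_eq_aGo, aGo_eq_go s.toList false]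
  rfl
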